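-- pv_equiv track=rewrite | github.com/DJWightman/adventOfCode24 | day12/src/main.py | getNewSides
-- ===== SOURCE A (Python) =====
-- def getNewSides(mapSize, sweepLine, prevSweepLine):
--     changes = {"removedPoint": [], "addedPoint" : []}
--     for point in range(mapSize):
--         if (point in prevSweepLine and point in sweepLine) or (point not in prevSweepLine and point not in sweepLine):
--             continue
--         elif point in prevSweepLine:
--             changes["removedPoint"] += [point]
--         else:
--             changes["addedPoint"] += [point]
--     newSides = 0
--     for key, changeList in changes.items():
--         if not changeList:
--             continue
--         newSides += 1
--         for i, x in enumerate(changeList[:-1]):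
--             if changeList[i + 1] - changeList[i] > 1:
--                 newSides += 1
--     return newSides
-- ===== SOURCE B (Python) =====
-- def getNewSides(mapSize, sweepLine, prevSweepLine):
--     prev = set(prevSweepLine)
--     cur = set(sweepLine)
--     sides = 0
--     state = 0  # change-state of the previous point: 0 unchanged, 1 removed, 2 added
--     for p in range(mapSize):
--         if p in prev:
--             s = 0 if p in cur else 1
--         else:
--             s = 2 if p in cur else 0
--         if s != 0 and s != state:
--             sides += 1
--         state = s
--     return sides
-- ===== Notes on version B (the rewrite author's own statement) =====
-- stated objective: alternative
-- what changed: Instead of materialising two change lists (with list-membership tests per point) and then counting index-adjacent gaps in each list, B makes one sweep over range(mapSize) carrying only the previous point's change-state (unchanged/removed/added) and counts transitions into a nonzero state; membership is via two prebuilt sets and no intermediate lists are built.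
import Mathlib
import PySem

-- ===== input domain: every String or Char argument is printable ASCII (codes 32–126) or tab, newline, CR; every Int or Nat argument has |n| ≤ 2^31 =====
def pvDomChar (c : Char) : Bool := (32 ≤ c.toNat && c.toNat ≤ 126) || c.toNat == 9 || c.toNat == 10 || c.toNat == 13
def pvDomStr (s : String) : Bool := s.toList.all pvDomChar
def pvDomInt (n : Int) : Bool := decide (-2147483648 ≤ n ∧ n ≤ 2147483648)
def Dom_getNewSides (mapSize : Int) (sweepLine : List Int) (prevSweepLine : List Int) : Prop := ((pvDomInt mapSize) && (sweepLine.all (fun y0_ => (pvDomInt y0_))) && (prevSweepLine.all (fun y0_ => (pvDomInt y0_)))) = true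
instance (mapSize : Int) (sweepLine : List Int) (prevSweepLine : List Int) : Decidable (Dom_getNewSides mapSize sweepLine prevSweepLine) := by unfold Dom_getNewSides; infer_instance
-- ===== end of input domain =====

-- B replaces A's two-phase "build change lists, then count adjacent gaps per list" by one sweep
-- over the range carrying only the previous point's change-state, counting state transitions
-- (no intermediate lists); same return value.

-- ===== PORT A =====
-- Literal transliteration of A: build the 'changes' dict (its two lists, in the fixed key
-- order removedPoint, addedPoint) by a fold over range(mapSize), then the counting loops.
-- The pyGetD indices i and i+1 are always in range (i ranges over changeList[:-1]), so the
-- default 0 is never used, matching Python which never raises here.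
def getNewSides (mapSize : Int) (sweepLine : List Int) (prevSweepLine : List Int) : Int :=
  let changes : List Int × List Int :=
    (PySem.List.pyRange 0 mapSize 1).foldl
      (fun ch point =>
        if (prevSweepLine.contains point && sweepLine.contains point)
            || (!prevSweepLine.contains point && !sweepLine.contains point) then ch
        else if prevSweepLine.contains point then (ch.1 ++ [point], ch.2)
        else (ch.1, ch.2 ++ [point]))
      ([], [])
  [changes.1, changes.2].foldl
    (fun newSides changeList =>
      if changeList.isEmpty then newSides
      else
        (PySem.List.enumerate (PySem.List.slice changeList none (some (-1))) 0).foldl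
          (fun ns p =>
            if PySem.List.pyGetD changeList (p.1 + 1) 0 - PySem.List.pyGetD changeList p.1 0 > 1
            then ns + 1 else ns)
          (newSides + 1))
    0

-- ===== PORT B =====
-- Transliteration of Source B: one fold over range(mapSize); the accumulator is (sides, state)
-- where state is the change-state (0 unchanged, 1 removed, 2 added) of the previous point.
def getNewSides_alt (mapSize : Int) (sweepLine : List Int) (prevSweepLine : List Int) : Int :=
  let prev : PySem.Set Int := PySem.Set.ofList prevSweepLine
  let cur : PySem.Set Int := PySem.Set.ofList sweepLine
  ((PySem.List.pyRange 0 mapSize 1).foldl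
    (fun (st : Int × Int) p =>
      let s : Int :=
        if PySem.Set.contains prev p then (if PySem.Set.contains cur p then 0 else 1)
        else (if PySem.Set.contains cur p then 2 else 0)
      (if s ≠ 0 ∧ s ≠ st.2 then st.1 + 1 else st.1, s))
    ((0 : Int), (0 : Int))).1

-- ===== PRECONDITION & SPEC =====
def Spec_getNewSides (mapSize : Int) (sweepLine : List Int) (prevSweepLine : List Int) (out : Int) : Prop := out = getNewSides_alt mapSize sweepLine prevSweepLine
instance (mapSize : Int) (sweepLine : List Int) (prevSweepLine : List Int) (out : Int) : Decidable (Spec_getNewSides mapSize sweepLine prevSweepLine out) := by unfold Spec_getNewSides; infer_instance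

-- ===== CLAIM (what is proved, stated in full; the proofs are below) =====
def Claim_equal_getNewSides : Prop := ∀ (mapSize : Int) (sweepLine : List Int) (prevSweepLine : List Int), Dom_getNewSides mapSize sweepLine prevSweepLine → Spec_getNewSides mapSize sweepLine prevSweepLine (getNewSides mapSize sweepLine prevSweepLine)

-- ===== LEMMAS AND PROOFS =====

-- number of adjacent gaps > 1 in a list (the common core of A's two side counts)
def pvGapCount : List Int → Int
  | [] => 0
  | [_] => 0
  | a :: b :: t => (if b - a > 1 then 1 else 0) + pvGapCount (b :: t)

-- run-counting step over an ascending list, tracking the last seen element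
def pvRunsStep (st : Int × Option Int) (p : Int) : Int × Option Int :=
  match st.2 with
  | none => (st.1 + 1, some p)
  | some last => (if p - last > 1 then st.1 + 1 else st.1, some p)

def pvRuns (points : List Int) : Int := (points.foldl pvRunsStep (0, none)).1

lemma pvRuns_go (l : List Int) (c : Int) (a : Int) :
    (l.foldl pvRunsStep (c, some a)).1 = c + pvGapCount (a :: l) := by
  induction l generalizing c a with
  | nil => simp [pvGapCount]
  | cons b t ih =>
      simp only [List.foldl_cons, pvRunsStep, ih, pvGapCount]
      split_ifs <;> ring

lemma pvRuns_eq (xs : List Int) :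
    pvRuns xs = if xs.isEmpty then 0 else 1 + pvGapCount xs := by
  cases xs with
  | nil => rfl
  | cons a t => simp [pvRuns, pvRunsStep, pvRuns_go, List.foldl_cons]

-- A's inner loop over enumerate(changeList[:-1]), generalized over a consumed prefix
lemma innerA (cl pre : List Int) (acc : Int) (s : Int) (hs : s = (pre.length : Int)) :
    (PySem.List.enumerate cl.dropLast s).foldl
      (fun ns p =>
        if PySem.List.pyGetD (pre ++ cl) (p.1 + 1) 0 - PySem.List.pyGetD (pre ++ cl) p.1 0 > 1
        then ns + 1 else ns)
      acc = acc + pvGapCount cl := by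
  subst hs
  induction cl generalizing pre acc with
  | nil => simp [PySem.List.enumerate_nil, pvGapCount]
  | cons a t ih =>
      cases t with
      | nil => simp [PySem.List.enumerate_nil, pvGapCount]
      | cons b t' =>
          have hd : (a :: b :: t').dropLast = a :: (b :: t').dropLast := by
            simp [List.dropLast]
          rw [hd, PySem.List.enumerate_cons]
          have h0 : PySem.List.pyGetD (pre ++ a :: b :: t') (pre.length : Int) 0 = a := by
            rw [PySem.List.pyGetD_natCast]
            simp [List.getD]
          have h1 : PySem.List.pyGetD (pre ++ a :: b :: t') ((pre.length : Int) + 1) 0 = b := by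
            have : ((pre.length : Int) + 1) = ((pre.length + 1 : Nat) : Int) := by push_cast; ring
            rw [this, PySem.List.pyGetD_natCast]
            have : pre ++ a :: b :: t' = (pre ++ [a]) ++ b :: t' := by simp
            rw [this]
            simp [List.getD]
          have hlen : (pre.length : Int) + 1 = ((pre ++ [a]).length : Int) := by
            simp
          have hre : pre ++ a :: b :: t' = (pre ++ [a]) ++ b :: t' := by simp
          simp only [List.foldl_cons]
          rw [h1, h0, hre, hlen, ih (pre ++ [a])]
          simp only [pvGapCount]
          split_ifs <;> ring

-- A's first loop builds exactly the two filtered range lists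
lemma loopA (sweepLine prevSweepLine : List Int) (rng : List Int) (r0 a0 : List Int) :
    rng.foldl
      (fun (ch : List Int × List Int) point =>
        if (prevSweepLine.contains point && sweepLine.contains point)
            || (!prevSweepLine.contains point && !sweepLine.contains point) then ch
        else if prevSweepLine.contains point then (ch.1 ++ [point], ch.2)
        else (ch.1, ch.2 ++ [point]))
      (r0, a0)
    = (r0 ++ rng.filter (fun p => prevSweepLine.contains p && !sweepLine.contains p),
       a0 ++ rng.filter (fun p => !prevSweepLine.contains p && sweepLine.contains p)) := by
  induction rng generalizing r0 a0 with
  | nil => simp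
  | cons x rs ih =>
      simp only [List.foldl_cons, List.filter_cons]
      cases hp : prevSweepLine.contains x <;> cases hs : sweepLine.contains x <;>
        simp only [Bool.not_true, Bool.not_false, Bool.and_true, Bool.and_false,
          Bool.or_true, Bool.or_false, Bool.and_self, reduceIte] <;>
        rw [ih] <;> simp

-- A equals "runs of removed" + "runs of added" over the filtered range lists
lemma A_eq_runs (mapSize : Int) (sweepLine prevSweepLine : List Int) :
    getNewSides mapSize sweepLine prevSweepLine
    = pvRuns ((PySem.List.pyRange 0 mapSize 1).filter
        (fun p => prevSweepLine.contains p && !sweepLine.contains p))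
      + pvRuns ((PySem.List.pyRange 0 mapSize 1).filter
        (fun p => !prevSweepLine.contains p && sweepLine.contains p)) := by
  simp only [getNewSides]
  rw [loopA]
  set R := (PySem.List.pyRange 0 mapSize 1).filter
      (fun p => prevSweepLine.contains p && !sweepLine.contains p) with hR
  set Ad := (PySem.List.pyRange 0 mapSize 1).filter
      (fun p => !prevSweepLine.contains p && sweepLine.contains p) with hA
  simp only [List.nil_append, List.foldl_cons, List.foldl_nil,
    PySem.List.slice_to_neg_one, pvRuns_eq]
  have key : ∀ (cl : List Int) (acc : Int),
      (if cl.isEmpty then acc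
       else (PySem.List.enumerate cl.dropLast 0).foldl
          (fun ns p =>
            if PySem.List.pyGetD cl (p.1 + 1) 0 - PySem.List.pyGetD cl p.1 0 > 1
            then ns + 1 else ns)
          (acc + 1))
      = acc + (if cl.isEmpty then 0 else 1 + pvGapCount cl) := by
    intro cl acc
    by_cases h : cl.isEmpty
    · simp [h]
    · rw [if_neg h, if_neg h]
      have := innerA cl [] (acc + 1) 0 (by simp)
      simp only [List.nil_append] at this
      exact this.trans (by ring)
  rw [key R 0, key Ad]
  ring

-- membership in set(xs) is membership in xs
lemma contains_ofList (xs : List Int) (p : Int) :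
    PySem.Set.contains (PySem.Set.ofList xs) p = xs.contains p := by
  by_cases h : p ∈ xs <;>
    simp [PySem.Set.contains, PySem.Set.mem_ofList, h]

-- range(a, b) with step 1 is a chain of successors
lemma chain_pyRange (a b : Int) :
    List.IsChain (fun u v : Int => v = u + 1) (PySem.List.pyRange a b 1) := by
  by_cases h : b ≤ a
  · rw [PySem.List.pyRange_one_eq_nil h]; simp
  · rw [PySem.List.pyRange_one_cons (by omega), List.isChain_cons]
    refine ⟨?_, chain_pyRange (a + 1) b⟩
    intro y hy
    by_cases h2 : b ≤ a + 1
    · rw [PySem.List.pyRange_one_eq_nil h2] at hy; simp at hy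
    · rw [PySem.List.pyRange_one_cons (by omega)] at hy
      simp at hy; omega
termination_by (b - a).toNat
decreasing_by omega

-- the heart of the equivalence: over a successor chain, B's single state-machine sweep
-- computes the sum of the two run counts, given the state/last-element invariant at the head
lemma combine (pc cc : Int → Bool) (c : List Int)
    (hc : List.IsChain (fun u v : Int => v = u + 1) c) :
    ∀ (n1 n2 : Int) (l1 l2 : Option Int) (state : Int),
      (∀ x, c.head? = some x →
        (state = 1 ↔ l1 = some (x - 1)) ∧ (state = 2 ↔ l2 = some (x - 1)) ∧
        (∀ v, l1 = some v → v ≤ x - 1) ∧ (∀ v, l2 = some v → v ≤ x - 1)) →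
      (c.foldl
        (fun (st : Int × Int) p =>
          let s : Int := if pc p then (if cc p then 0 else 1) else (if cc p then 2 else 0)
          (if s ≠ 0 ∧ s ≠ st.2 then st.1 + 1 else st.1, s))
        (n1 + n2, state)).1
      = ((c.filter (fun p => pc p && !cc p)).foldl pvRunsStep (n1, l1)).1
        + ((c.filter (fun p => !pc p && cc p)).foldl pvRunsStep (n2, l2)).1 := by
  induction c with
  | nil => intro n1 n2 l1 l2 state _; simp
  | cons x t ih =>
      intro n1 n2 l1 l2 state hinv
      obtain ⟨hs1, hs2, hb1, hb2⟩ := hinv x rfl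
      rw [List.isChain_cons] at hc
      obtain ⟨hhd, hct⟩ := hc
      have hnext : ∀ y, t.head? = some y → y = x + 1 := fun y hy => hhd y hy
      simp only [List.foldl_cons, List.filter_cons]
      cases hp : pc x <;> cases hq : cc x
      · -- unchanged (not in either)
        simp only [Bool.not_false, Bool.and_false, Bool.and_true, Bool.false_eq_true, reduceIte]
        have : ((if (0 : Int) ≠ 0 ∧ (0 : Int) ≠ state then n1 + n2 + 1 else n1 + n2), (0 : Int))
            = (n1 + n2, (0 : Int)) := by simp
        rw [this]
        apply ih hct
        intro y hy
        have hyx := hnext y hy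
        refine ⟨?_, ?_, ?_, ?_⟩
        · constructor
          · intro h; omega
          · intro h; exact absurd (hb1 _ h) (by omega)
        · constructor
          · intro h; omega
          · intro h; exact absurd (hb2 _ h) (by omega)
        · intro v hv; have := hb1 v hv; omega
        · intro v hv; have := hb2 v hv; omega
      · -- added (in cur only)
        simp only [Bool.not_true, Bool.not_false, Bool.and_self, Bool.false_eq_true, reduceIte]
        have hcond : ((2 : Int) ≠ 0 ∧ (2 : Int) ≠ state) ↔ l2 ≠ some (x - 1) := by
          constructor
          · intro ⟨_, h⟩ hl; exact h (hs2.mpr hl).symm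
          · intro hl; exact ⟨by norm_num, fun h => hl (hs2.mp h.symm)⟩
        have hstep : pvRunsStep (n2, l2) x
            = ((if l2 = some (x - 1) then n2 else n2 + 1), some x) := by
          cases l2 with
          | none => simp [pvRunsStep]
          | some v =>
              have hv := hb2 v rfl
              simp only [pvRunsStep]
              by_cases hveq : v = x - 1
              · subst hveq; norm_num
              · have hg : x - v > 1 := by omega
                simp [hg, hveq]
        rw [List.foldl_cons, hstep]
        have harith : (if (2:Int) ≠ 0 ∧ (2:Int) ≠ state then n1 + n2 + 1 else n1 + n2)
            = n1 + (if l2 = some (x - 1) then n2 else n2 + 1) := by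
          by_cases h : l2 = some (x - 1)
          · rw [if_neg (by rw [hcond]; simp [h]), if_pos h]
          · rw [if_pos (hcond.mpr h), if_neg h]; ring
        rw [harith]
        apply ih hct
        intro y hy
        have hyx := hnext y hy
        refine ⟨?_, ?_, ?_, ?_⟩
        · constructor
          · intro h; omega
          · intro h
            have := hb1 _ h; omega
        · constructor
          · intro _; subst hyx; simp
          · intro _; rfl
        · intro v hv; have := hb1 v hv; omega
        · intro v hv; injection hv with hv; omega
      · -- removed (in prev only)
        simp only [Bool.not_true, Bool.not_false, Bool.and_self, Bool.false_eq_true, reduceIte]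
        have hcond : ((1 : Int) ≠ 0 ∧ (1 : Int) ≠ state) ↔ l1 ≠ some (x - 1) := by
          constructor
          · intro ⟨_, h⟩ hl; exact h (hs1.mpr hl).symm
          · intro hl; exact ⟨by norm_num, fun h => hl (hs1.mp h.symm)⟩
        have hstep : pvRunsStep (n1, l1) x
            = ((if l1 = some (x - 1) then n1 else n1 + 1), some x) := by
          cases l1 with
          | none => simp [pvRunsStep]
          | some v =>
              have hv := hb1 v rfl
              simp only [pvRunsStep]
              by_cases hveq : v = x - 1
              · subst hveq; norm_num
              · have hg : x - v > 1 := by omega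
                simp [hg, hveq]
        rw [List.foldl_cons, hstep]
        have harith : (if (1:Int) ≠ 0 ∧ (1:Int) ≠ state then n1 + n2 + 1 else n1 + n2)
            = (if l1 = some (x - 1) then n1 else n1 + 1) + n2 := by
          by_cases h : l1 = some (x - 1)
          · rw [if_neg (by rw [hcond]; simp [h]), if_pos h]
          · rw [if_pos (hcond.mpr h), if_neg h]; ring
        rw [harith]
        apply ih hct
        intro y hy
        have hyx := hnext y hy
        refine ⟨?_, ?_, ?_, ?_⟩
        · constructor
          · intro _; subst hyx; simp
          · intro _; rfl
        · constructor
          · intro h; omega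
          · intro h; have := hb2 _ h; omega
        · intro v hv; injection hv with hv; omega
        · intro v hv; have := hb2 v hv; omega
      · -- unchanged (in both)
        simp only [Bool.not_true, Bool.and_false, Bool.and_true, Bool.false_eq_true, reduceIte]
        have : ((if (0 : Int) ≠ 0 ∧ (0 : Int) ≠ state then n1 + n2 + 1 else n1 + n2), (0 : Int))
            = (n1 + n2, (0 : Int)) := by simp
        rw [this]
        apply ih hct
        intro y hy
        have hyx := hnext y hy
        refine ⟨?_, ?_, ?_, ?_⟩
        · constructor
          · intro h; omega
          · intro h; exact absurd (hb1 _ h) (by omega)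
        · constructor
          · intro h; omega
          · intro h; exact absurd (hb2 _ h) (by omega)
        · intro v hv; have := hb1 v hv; omega
        · intro v hv; have := hb2 v hv; omega

-- ===== VERDICT (by name: the statement is the Claim_ definition above) =====
theorem getNewSides_spec : Claim_equal_getNewSides := by
  intro mapSize sweepLine prevSweepLine _
  show getNewSides mapSize sweepLine prevSweepLine
      = getNewSides_alt mapSize sweepLine prevSweepLine
  rw [A_eq_runs]
  simp only [getNewSides_alt, contains_ofList]
  have := combine (fun p => prevSweepLine.contains p) (fun p => sweepLine.contains p)
    (PySem.List.pyRange 0 mapSize 1) (chain_pyRange 0 mapSize)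
    0 0 none none 0 (by intro x _; refine ⟨by simp, by simp, by simp, by simp⟩)
  simp only [zero_add] at this
  rw [this]
  rfl
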